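-- pv_equiv track=rewrite | github.com/samuelmckean/CS_303E | Project5.py | dnaCompare
-- ===== SOURCE A (Python) =====
-- def dnaCompare(s1, s2):
--     # If match return s1 and s2
--     match = True    # Indicates whether strand was match
--     firstNonMatchIndex = 0  # Index of first unmatched letters
--     # Loop through all chars and check for match
--     for i in range(len(s1)):
--         # If match check next char
--         if (s1[i] == 'A' and s2[i] == 'T' or
--                 s1[i] == 'T' and s2[i] == 'A' or
--                 s1[i] == 'C' and s2[i] == 'G' or
--                 s1[i] == 'G' and s2[i] == 'C'):
--             continue
--         # If not match, update firstNonMatchIndex and match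
--         else:
--             firstNonMatchIndex = i
--             match = False
--             break
--     if match:
--         return s1, s2
--     # Create new strands excluding firstNonMatch and recall dnaCompare
--     else:
--         # Separate strands at firstNonMatch index (excluding index itself)
--         s11, s12 = dnaCompare(s1[:firstNonMatchIndex], s2[:firstNonMatchIndex])
--         s21, s22 = dnaCompare(s1[firstNonMatchIndex+1:], s2[firstNonMatchIndex+1:])
--
--         # Return larger strand of pairs
--         if len(s11) > len(s21):
--             return s11, s12
--         else:
--             return s21, s22
-- ===== SOURCE B (Python) =====
-- # Split both strands at every non-complementary position and return the longest
-- # piece (the rightmost one on ties), replacing A's recursive splitting.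
-- COMPLEMENT = {'A': 'T', 'T': 'A', 'C': 'G', 'G': 'C'}
--
-- def dnaCompare(s1, s2):
--     pieces = []
--     start = 0
--     for i in range(len(s1)):
--         # one-char slice: '' once past the end of s2, never an IndexError
--         if s2[i:i+1] != COMPLEMENT.get(s1[i]):
--             pieces.append((s1[start:i], s2[start:i]))
--             start = i + 1
--     pieces.append((s1[start:], s2[start:]))
--     best = pieces[0]
--     for p in pieces[1:]:
--         if len(p[0]) >= len(best[0]):
--             best = p
--     return best
-- ===== Notes on version B (the rewrite author's own statement) =====
-- stated objective: faster
-- what changed: Replaced A's recursive split-at-first-mismatch (which rescans the fully-matching left part and re-slices the remainder on every mismatch) by a single linear scan that splits both strands at every non-complementary position into pieces and picks the longest piece, later pieces winning ties; Pre_ excludes only the inputs on which A raises IndexError (an A/T/C/G character of s1 at a position beyond the end of s2).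
import Mathlib
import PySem

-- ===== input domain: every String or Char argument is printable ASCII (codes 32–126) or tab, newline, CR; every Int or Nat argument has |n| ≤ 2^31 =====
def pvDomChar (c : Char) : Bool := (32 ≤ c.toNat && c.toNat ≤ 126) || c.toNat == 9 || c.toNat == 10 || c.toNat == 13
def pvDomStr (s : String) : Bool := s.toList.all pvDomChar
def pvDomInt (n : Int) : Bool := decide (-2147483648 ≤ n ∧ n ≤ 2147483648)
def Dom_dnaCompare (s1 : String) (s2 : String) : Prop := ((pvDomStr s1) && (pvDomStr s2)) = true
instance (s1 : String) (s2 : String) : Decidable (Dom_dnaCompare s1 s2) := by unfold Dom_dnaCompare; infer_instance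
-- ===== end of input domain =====

-- B replaces A's recursive split-at-first-mismatch by one linear scan that splits
-- both strands at the mismatch positions and picks the longest piece
-- (objective: faster, linear instead of quadratic).

-- ===== PORT A =====
-- A's complement test `s1[i]=='A' and s2[i]=='T' or ...`, with o = s2[i] (none = out of
-- range).  For o = none and c ∈ "ATCG" Python raises IndexError — those inputs are
-- excluded by Pre_; for other c Python short-circuits to False, as here.
def testA (c : Char) (o : Option Char) : Bool :=
  (c == 'A' && o == some 'T') || (c == 'T' && o == some 'A') ||
  (c == 'C' && o == some 'G') || (c == 'G' && o == some 'C')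

-- A's for-loop: index of the first non-complementary position (None: full match).
def findMMAux : List Char → List Char → Nat → Option Nat
  | [], _, _ => none
  | c :: r, l2, i => if testA c l2[i]? then findMMAux r l2 (i + 1) else some i

-- needed by coreA's decreasing_by
theorem findMMAux_bounds : ∀ (r l2 : List Char) (i f : Nat),
    findMMAux r l2 i = some f → i ≤ f ∧ f < i + r.length := by
  intro r
  induction r with
  | nil => intro l2 i f h; simp [findMMAux] at h
  | cons c r ih =>
    intro l2 i f h
    simp only [findMMAux] at h
    split at h
    · have := ih l2 (i + 1) f h; simp; omega
    · simp at h; simp; omega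

def coreA (l1 l2 : List Char) : List Char × List Char :=
  match h : findMMAux l1 l2 0 with
  | none => (l1, l2)
  | some f =>
    let p1 := coreA (l1.take f) (l2.take f)
    let p2 := coreA (l1.drop (f + 1)) (l2.drop (f + 1))
    if p2.1.length < p1.1.length then p1 else p2
termination_by l1.length
decreasing_by
  · have := findMMAux_bounds l1 l2 0 f h
    simp only [List.length_take]; omega
  · have := findMMAux_bounds l1 l2 0 f h
    simp only [List.length_drop]; omega

def dnaCompare (s1 : String) (s2 : String) : List String :=
  let p := coreA s1.toList s2.toList
  [String.ofList p.1, String.ofList p.2]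

-- ===== PORT B =====
-- COMPLEMENT.get
def cmpl (c : Char) : Option Char :=
  if c = 'A' then some 'T' else if c = 'T' then some 'A'
  else if c = 'C' then some 'G' else if c = 'G' then some 'C' else none

-- `s2[i:i+1] != COMPLEMENT.get(s1[i])`: the one-char slice s (empty past the end of
-- s2) is compared with the optional complement; a string is never equal to None.
def mismTest (c : Char) (s : List Char) : Bool :=
  match cmpl c with
  | none => true
  | some d => !(s == [d])

-- the for-loop of Source B: cut both strands at every mismatching index; the final
-- piece is the remaining tail of both strands.
def piecesB (l1 l2 : List Char) : List Char → Nat → Nat → List (List Char × List Char)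
  | [], _, start => [(l1.drop start, l2.drop start)]
  | c :: r, i, start =>
    if mismTest c ((l2.drop i).take 1) then
      ((l1.drop start).take (i - start), (l2.drop start).take (i - start)) ::
        piecesB l1 l2 r (i + 1) (i + 1)
    else piecesB l1 l2 r (i + 1) start

-- `for p in pieces[1:]: if len(p[0]) >= len(best[0]): best = p`
def pickB : List Char × List Char → List (List Char × List Char) → List Char × List Char
  | best, [] => best
  | best, p :: ps => pickB (if best.1.length ≤ p.1.length then p else best) ps

def dnaCompare_alt (s1 : String) (s2 : String) : List String :=
  match piecesB s1.toList s2.toList s1.toList 0 0 with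
  | [] => []          -- unreachable: the pieces list always ends with the tail piece
  | p :: ps =>
    let b := pickB p ps
    [String.ofList b.1, String.ofList b.2]

-- ===== PRECONDITION & SPEC =====
-- Pre_ excludes exactly the inputs on which A raises IndexError: a character of
-- s1 from "ATCG" at a position ≥ len(s2) makes A index s2 out of range.
def Pre_dnaCompare (s1 : String) (s2 : String) : Prop :=
  ((s1.toList.drop s2.toList.length).all
    (fun c => !((['A', 'T', 'C', 'G'] : List Char).contains c))) = true
instance (s1 : String) (s2 : String) : Decidable (Pre_dnaCompare s1 s2) := by
  unfold Pre_dnaCompare; infer_instance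

def pvWitness_dnaCompare : String × String := ("AT", "TA")

def Spec_dnaCompare (s1 : String) (s2 : String) (out : List String) : Prop := out = dnaCompare_alt s1 s2
instance (s1 : String) (s2 : String) (out : List String) : Decidable (Spec_dnaCompare s1 s2 out) := by unfold Spec_dnaCompare; infer_instance

-- ===== CLAIM (what is proved, stated in full; the proofs are below) =====
def Claim_equal_dnaCompare : Prop := ∀ (s1 : String) (s2 : String), Dom_dnaCompare s1 s2 → Pre_dnaCompare s1 s2 → Spec_dnaCompare s1 s2 (dnaCompare s1 s2)

-- ===== LEMMAS AND PROOFS =====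

-- option-level mismatch test used by the spec-level scan description
def mismB (c : Char) (o : Option Char) : Bool :=
  match o with
  | none => true
  | some b => !(cmpl c == some b)

theorem take_one_drop (l2 : List Char) (i : Nat) :
    (l2.drop i).take 1 = match l2[i]? with | some b => [b] | none => [] := by
  by_cases h : i < l2.length
  · rw [List.drop_eq_getElem_cons h, List.getElem?_eq_getElem h]
    rfl
  · rw [List.drop_of_length_le (by omega), List.getElem?_eq_none (by omega)]
    rfl

theorem mismTest_eq (c : Char) (l2 : List Char) (i : Nat) :
    mismTest c ((l2.drop i).take 1) = mismB c l2[i]? := by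
  rw [take_one_drop]
  cases h : l2[i]? with
  | none => cases hc : cmpl c <;> simp [mismTest, mismB, hc]
  | some b =>
    cases hc : cmpl c with
    | none => simp [mismTest, mismB, hc]
    | some d => simp [mismTest, mismB, hc, eq_comm]

-- The two per-position tests are complementary booleans.
theorem mism_eq (c : Char) (o : Option Char) : mismB c o = !(testA c o) := by
  cases o with
  | none => simp [mismB, testA]
  | some b =>
    simp only [mismB, testA, cmpl]
    by_cases hA : c = 'A' <;> by_cases hT : c = 'T' <;> by_cases hC : c = 'C' <;>
      by_cases hG : c = 'G' <;>
      simp [hA, hT, hC, hG] <;> exact eq_comm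

-- spec-level description of the scan: the list of closed runs (start, length) …
def segsOf : List Char → List Char → Nat → Nat → List (Nat × Nat)
  | [], _, _, _ => []
  | c :: r, l2, i, seg =>
    if mismB c l2[i]? then (seg, i - seg) :: segsOf r l2 (i + 1) (i + 1)
    else segsOf r l2 (i + 1) seg

-- … and the start of the final (suffix) run.
def lastSeg : List Char → List Char → Nat → Nat → Nat
  | [], _, _, seg => seg
  | c :: r, l2, i, seg =>
    if mismB c l2[i]? then lastSeg r l2 (i + 1) (i + 1) else lastSeg r l2 (i + 1) seg

-- `best = p if len(p) >= len(best)` at the level of (start, length, is-suffix) entries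
def updB (best : Option (Nat × Nat × Bool)) (s L : Nat) (suf : Bool) :
    Option (Nat × Nat × Bool) :=
  match best with
  | none => some (s, L, suf)
  | some (_, bl, _) => if bl ≤ L then some (s, L, suf) else best

def foldU (best : Option (Nat × Nat × Bool)) (es : List (Nat × Nat × Bool)) :
    Option (Nat × Nat × Bool) :=
  es.foldl (fun b e => updB b e.1 e.2.1 e.2.2) best

-- all candidate runs, closed ones then the suffix run
def entriesOf (l1 l2 : List Char) : List (Nat × Nat × Bool) :=
  (segsOf l1 l2 0 0).map (fun e => (e.1, e.2, false)) ++
    [(lastSeg l1 l2 0 0, l1.length - lastSeg l1 l2 0 0, true)]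

def chosen (l1 l2 : List Char) : Nat × Nat × Bool :=
  (foldU none (entriesOf l1 l2)).getD (0, 0, true)

-- the slices an entry denotes: the tail of both strands for the suffix run
def sliceBy (l1 l2 : List Char) (e : Nat × Nat × Bool) : List Char × List Char :=
  if e.2.2 then (l1.drop e.1, l2.drop e.1)
  else ((l1.drop e.1).take e.2.1, (l2.drop e.1).take e.2.1)

theorem foldU_some_isSome : ∀ (es : List (Nat × Nat × Bool)) (cur : Nat × Nat × Bool),
    (foldU (some cur) es).isSome := by
  intro es
  induction es with
  | nil => intro cur; simp [foldU]
  | cons e es ih =>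
    intro cur
    simp only [foldU, List.foldl_cons, updB]
    split <;> exact ih _

theorem foldU_none_nil : ∀ (es : List (Nat × Nat × Bool)), foldU none es = none → es = [] := by
  intro es h
  cases es with
  | nil => rfl
  | cons e es =>
    exfalso
    have hstep : foldU (none : Option (Nat × Nat × Bool)) (e :: es) =
        foldU (some (e.1, e.2.1, e.2.2)) es := by
      simp [foldU, updB]
    rw [hstep] at h
    have h2 := foldU_some_isSome es (e.1, e.2.1, e.2.2)
    rw [h] at h2
    simp at h2

-- the fold with seeded best, in terms of the fold from none (last maximal run wins)
theorem foldU_seeded : ∀ (es : List (Nat × Nat × Bool)) (cur m : Nat × Nat × Bool),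
    foldU none es = some m →
    foldU (some cur) es = some (if cur.2.1 ≤ m.2.1 then m else cur) := by
  intro es
  induction es with
  | nil => intro cur m h; simp [foldU] at h
  | cons e es ih =>
    intro cur m h
    have hcons : ∀ (b : Option (Nat × Nat × Bool)),
        foldU b (e :: es) = foldU (updB b e.1 e.2.1 e.2.2) es := by
      intro b; simp [foldU]
    rw [hcons] at h ⊢
    have hnone : updB (none : Option (Nat × Nat × Bool)) e.1 e.2.1 e.2.2 =
        some (e.1, e.2.1, e.2.2) := rfl
    rw [hnone] at h
    obtain ⟨cs, cl, cf⟩ := cur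
    have hcur : updB (some (cs, cl, cf)) e.1 e.2.1 e.2.2 =
        some (if cl ≤ e.2.1 then (e.1, e.2.1, e.2.2) else (cs, cl, cf)) := by
      simp only [updB]; split_ifs <;> rfl
    rw [hcur]
    rcases h' : foldU none es with _ | m'
    · have hes : es = [] := foldU_none_nil es h'
      subst hes
      simp only [foldU, List.foldl_nil] at h ⊢
      have hm : m = (e.1, e.2.1, e.2.2) := (Option.some.inj h).symm
      subst hm
      split_ifs <;> rfl
    · have hm : m = if e.2.1 ≤ m'.2.1 then m' else (e.1, e.2.1, e.2.2) := by
        have := ih (e.1, e.2.1, e.2.2) m' h'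
        rw [this] at h
        exact (Option.some.inj h).symm
      rw [ih _ m' h']
      subst hm
      congr 1
      by_cases h1 : e.2.1 ≤ m'.2.1 <;> by_cases h2 : cl ≤ e.2.1 <;>
        simp only [h1, h2, if_true, if_false] <;>
        split_ifs <;> first | rfl | omega

theorem foldU_shift : ∀ (es : List (Nat × Nat × Bool)) (b : Option (Nat × Nat × Bool)) (k : Nat),
    foldU (b.map (fun e => (e.1 + k, e.2.1, e.2.2))) (es.map (fun e => (e.1 + k, e.2.1, e.2.2))) =
      (foldU b es).map (fun e => (e.1 + k, e.2.1, e.2.2)) := by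
  intro es
  induction es with
  | nil => intro b k; simp [foldU]
  | cons e es ih =>
    intro b k
    simp only [List.map_cons, foldU, List.foldl_cons]
    have : updB (b.map (fun e => (e.1 + k, e.2.1, e.2.2))) (e.1 + k) e.2.1 e.2.2 =
        (updB b e.1 e.2.1 e.2.2).map (fun e => (e.1 + k, e.2.1, e.2.2)) := by
      match b with
      | none => simp [updB]
      | some (s', L', suf') => simp only [updB, Option.map_some]; split <;> simp
    rw [this]
    exact ih _ _

theorem foldU_mem : ∀ (es : List (Nat × Nat × Bool)) (b : Option (Nat × Nat × Bool))
    (m : Nat × Nat × Bool), foldU b es = some m → b = some m ∨ m ∈ es := by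
  intro es
  induction es with
  | nil => intro b m h; left; simpa [foldU] using h
  | cons e es ih =>
    intro b m h
    have hcons : foldU b (e :: es) = foldU (updB b e.1 e.2.1 e.2.2) es := by simp [foldU]
    rw [hcons] at h
    rcases ih _ _ h with h' | h'
    · match b, h' with
      | none, h' =>
        right
        have heta : (e.1, e.2.1, e.2.2) = e := rfl
        have hm : m = (e.1, e.2.1, e.2.2) := by simpa [updB] using h'.symm
        rw [hm, heta]; simp
      | some p, h' =>
        simp only [updB] at h'
        split at h'
        · right
          have heta : (e.1, e.2.1, e.2.2) = e := rfl
          have hm : m = (e.1, e.2.1, e.2.2) := by simpa using h'.symm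
          rw [hm, heta]; simp
        · left; exact h'
    · right; right; exact h'

-- bounds for the runs produced by the scan
theorem segsOf_bounds : ∀ (r l2 : List Char) (i seg : Nat), seg ≤ i →
    ∀ e ∈ segsOf r l2 i seg, seg ≤ e.1 ∧ e.1 + e.2 ≤ i + r.length := by
  intro r
  induction r with
  | nil => intro l2 i seg _ e he; simp [segsOf] at he
  | cons c r ih =>
    intro l2 i seg hsi e he
    simp only [segsOf] at he
    split at he
    · rcases List.mem_cons.1 he with h | h
      · subst h; constructor <;> simp <;> omega
      · have := ih l2 (i + 1) (i + 1) (le_refl _) e h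
        constructor
        · omega
        · simp only [List.length_cons]; omega
    · have := ih l2 (i + 1) seg (by omega) e he
      constructor
      · omega
      · simp only [List.length_cons]; omega

theorem lastSeg_bounds : ∀ (r l2 : List Char) (i seg : Nat), seg ≤ i →
    seg ≤ lastSeg r l2 i seg ∧ lastSeg r l2 i seg ≤ i + r.length := by
  intro r
  induction r with
  | nil => intro l2 i seg hsi; simp [lastSeg]; omega
  | cons c r ih =>
    intro l2 i seg hsi
    simp only [lastSeg, List.length_cons]
    split
    · have := ih l2 (i + 1) (i + 1) (le_refl _); omega
    · have := ih l2 (i + 1) seg (by omega); omega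

-- shifting all indices by k = dropping k characters of l2
theorem segsOf_shift : ∀ (r l2 : List Char) (i seg k : Nat),
    segsOf r l2 (i + k) (seg + k) = (segsOf r (l2.drop k) i seg).map (fun e => (e.1 + k, e.2)) := by
  intro r
  induction r with
  | nil => intro l2 i seg k; simp [segsOf]
  | cons c r ih =>
    intro l2 i seg k
    have hidx : l2[i + k]? = (l2.drop k)[i]? := by rw [List.getElem?_drop]; ring_nf
    have h1 : i + k + 1 = (i + 1) + k := by omega
    have h2 : i + k - (seg + k) = i - seg := by omega
    simp only [segsOf, hidx]
    split
    · rw [h1, ih l2 (i + 1) (i + 1) k]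
      simp [h2]
    · rw [h1, ih l2 (i + 1) seg k]

theorem lastSeg_shift : ∀ (r l2 : List Char) (i seg k : Nat),
    lastSeg r l2 (i + k) (seg + k) = lastSeg r (l2.drop k) i seg + k := by
  intro r
  induction r with
  | nil => intro l2 i seg k; simp [lastSeg]
  | cons c r ih =>
    intro l2 i seg k
    have hidx : l2[i + k]? = (l2.drop k)[i]? := by rw [List.getElem?_drop]; ring_nf
    have h1 : i + k + 1 = (i + 1) + k := by omega
    simp only [lastSeg, hidx]
    split
    · rw [h1, ih l2 (i + 1) (i + 1) k]
    · rw [h1, ih l2 (i + 1) seg k]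

-- on a fully matching stretch the scan produces no closed run
theorem findMM_none_segs : ∀ (r l2 : List Char) (i seg : Nat), findMMAux r l2 i = none →
    segsOf r l2 i seg = [] ∧ lastSeg r l2 i seg = seg := by
  intro r
  induction r with
  | nil => intro l2 i seg _; simp [segsOf, lastSeg]
  | cons c r ih =>
    intro l2 i seg h
    simp only [findMMAux] at h
    split at h
    · rename_i ht
      have hm : mismB c l2[i]? = false := by rw [mism_eq, ht]; rfl
      rw [show segsOf (c :: r) l2 i seg = segsOf r l2 (i + 1) seg from by simp [segsOf, hm],
        show lastSeg (c :: r) l2 i seg = lastSeg r l2 (i + 1) seg from by simp [lastSeg, hm]]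
      exact ih l2 (i + 1) seg h
    · exact absurd h (by simp)

-- splitting the scan at the first mismatch f
theorem findMM_some_split : ∀ (r l2 : List Char) (i f : Nat), findMMAux r l2 i = some f →
    ∀ seg, segsOf r l2 i seg = (seg, f - seg) :: segsOf (r.drop (f + 1 - i)) l2 (f + 1) (f + 1)
      ∧ lastSeg r l2 i seg = lastSeg (r.drop (f + 1 - i)) l2 (f + 1) (f + 1) := by
  intro r
  induction r with
  | nil => intro l2 i f h; simp [findMMAux] at h
  | cons c r ih =>
    intro l2 i f h seg
    simp only [findMMAux] at h
    split at h
    · rename_i ht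
      have hb := findMMAux_bounds r l2 (i + 1) f h
      have hm : mismB c l2[i]? = false := by rw [mism_eq, ht]; rfl
      have hdrop : (c :: r).drop (f + 1 - i) = r.drop (f + 1 - (i + 1)) := by
        rw [show f + 1 - i = (f + 1 - (i + 1)) + 1 from by omega]
        rfl
      have := ih l2 (i + 1) f h seg
      rw [show segsOf (c :: r) l2 i seg = segsOf r l2 (i + 1) seg from by simp [segsOf, hm],
        show lastSeg (c :: r) l2 i seg = lastSeg r l2 (i + 1) seg from by simp [lastSeg, hm], hdrop]
      exact this
    · rename_i ht
      have hf : f = i := by simp at h; omega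
      have hfalse : testA c l2[i]? = false := by
        revert ht; cases testA c l2[i]? <;> simp
      have hm : mismB c l2[i]? = true := by rw [mism_eq, hfalse]; rfl
      subst hf
      have hdrop : (c :: r).drop (f + 1 - f) = r := by simp
      simp [segsOf, lastSeg, hm]

-- the fully matching left part: no mismatch is found in it
theorem findMM_left_none : ∀ (r l2 l2' : List Char) (i f : Nat),
    findMMAux r l2 i = some f → (∀ j, j < f → l2'[j]? = l2[j]?) →
    findMMAux (r.take (f - i)) l2' i = none := by
  intro r
  induction r with
  | nil => intro l2 l2' i f h _; simp [findMMAux] at h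
  | cons c r ih =>
    intro l2 l2' i f h hj
    simp only [findMMAux] at h
    split at h
    · rename_i ht
      have hb := findMMAux_bounds r l2 (i + 1) f h
      rw [show f - i = (f - (i + 1)) + 1 from by omega]
      simp only [List.take_succ_cons, findMMAux]
      rw [hj i (by omega), if_pos ht]
      exact ih l2 l2' (i + 1) f h hj
    · have hf : f = i := by simp at h; omega
      subst hf
      simp [findMMAux]

-- the candidate-run list splits at the first mismatch
theorem entriesOf_split (l1 l2 : List Char) (f : Nat) (h : findMMAux l1 l2 0 = some f) :
    entriesOf l1 l2 = (0, f, false) ::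
      (entriesOf (l1.drop (f + 1)) (l2.drop (f + 1))).map (fun e => (e.1 + (f + 1), e.2.1, e.2.2)) := by
  have hb := findMMAux_bounds l1 l2 0 f h
  have hsplit := findMM_some_split l1 l2 0 f h 0
  have hseg : segsOf l1 l2 0 0 =
      (0, f) :: (segsOf (l1.drop (f + 1)) (l2.drop (f + 1)) 0 0).map (fun e => (e.1 + (f + 1), e.2)) := by
    rw [hsplit.1]
    congr 1
    have := segsOf_shift (l1.drop (f + 1)) l2 0 0 (f + 1)
    simpa using this
  have hlast : lastSeg l1 l2 0 0 = lastSeg (l1.drop (f + 1)) (l2.drop (f + 1)) 0 0 + (f + 1) := by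
    rw [hsplit.2]
    have := lastSeg_shift (l1.drop (f + 1)) l2 0 0 (f + 1)
    simpa using this
  have hlsb := lastSeg_bounds (l1.drop (f + 1)) (l2.drop (f + 1)) 0 0 (le_refl _)
  have harith : l1.length - (lastSeg (l1.drop (f + 1)) (l2.drop (f + 1)) 0 0 + (f + 1)) =
      (l1.drop (f + 1)).length - lastSeg (l1.drop (f + 1)) (l2.drop (f + 1)) 0 0 := by
    simp only [List.length_drop]; omega
  simp only [entriesOf, hseg, hlast, List.map_cons, List.map_append, List.map_map,
    List.map_nil, harith]
  simp [Function.comp_def]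

theorem entriesOf_none (l1 l2 : List Char) (h : findMMAux l1 l2 0 = none) :
    entriesOf l1 l2 = [(0, l1.length, true)] := by
  have := findMM_none_segs l1 l2 0 0 h
  simp [entriesOf, this.1, this.2]

theorem chosen_some (l1 l2 : List Char) : foldU none (entriesOf l1 l2) = some (chosen l1 l2) := by
  rcases h : foldU none (entriesOf l1 l2) with _ | m
  · have := foldU_none_nil _ h
    simp [entriesOf] at this
  · simp [chosen, h]

theorem chosen_bounds (l1 l2 : List Char) :
    (chosen l1 l2).1 + (chosen l1 l2).2.1 ≤ l1.length ∧
      ((chosen l1 l2).2.2 = true → (chosen l1 l2).1 + (chosen l1 l2).2.1 = l1.length) := by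
  have h := chosen_some l1 l2
  rcases foldU_mem _ _ _ h with h' | h'
  · simp at h'
  · simp only [entriesOf, List.mem_append, List.mem_map, List.mem_singleton] at h'
    rcases h' with ⟨e, he, heq⟩ | h'
    · have := segsOf_bounds l1 l2 0 0 (le_refl _) e he
      rw [← heq]
      simp only
      constructor
      · omega
      · intro hfalse; simp at hfalse
    · have := lastSeg_bounds l1 l2 0 0 (le_refl _)
      rw [h']
      simp only
      constructor <;> omega

theorem chosen_none (l1 l2 : List Char) (h : findMMAux l1 l2 0 = none) :
    chosen l1 l2 = (0, l1.length, true) := by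
  simp [chosen, entriesOf_none l1 l2 h, foldU, updB]

theorem chosen_split (l1 l2 : List Char) (f : Nat) (h : findMMAux l1 l2 0 = some f) :
    chosen l1 l2 =
      if f ≤ (chosen (l1.drop (f + 1)) (l2.drop (f + 1))).2.1 then
        ((chosen (l1.drop (f + 1)) (l2.drop (f + 1))).1 + (f + 1),
          (chosen (l1.drop (f + 1)) (l2.drop (f + 1))).2.1,
          (chosen (l1.drop (f + 1)) (l2.drop (f + 1))).2.2)
      else (0, f, false) := by
  set m := chosen (l1.drop (f + 1)) (l2.drop (f + 1)) with hm
  have hsub := chosen_some (l1.drop (f + 1)) (l2.drop (f + 1))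
  have hsplit := entriesOf_split l1 l2 f h
  have hshift := foldU_shift (entriesOf (l1.drop (f + 1)) (l2.drop (f + 1))) none (f + 1)
  rw [hsub] at hshift
  have hcons : foldU none (entriesOf l1 l2) =
      foldU (some (0, f, false))
        ((entriesOf (l1.drop (f + 1)) (l2.drop (f + 1))).map (fun e => (e.1 + (f + 1), e.2.1, e.2.2))) := by
    rw [hsplit]; simp [foldU, updB]
  have hseeded := foldU_seeded
    ((entriesOf (l1.drop (f + 1)) (l2.drop (f + 1))).map (fun e => (e.1 + (f + 1), e.2.1, e.2.2)))
    (0, f, false) (m.1 + (f + 1), m.2.1, m.2.2) (by simpa using hshift)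
  have : foldU none (entriesOf l1 l2) =
      some (if f ≤ m.2.1 then (m.1 + (f + 1), m.2.1, m.2.2) else (0, f, false)) := by
    rw [hcons, hseeded]
  simp only [chosen] at *
  rw [this]
  rfl

theorem sliceBy_len (l1 l2 : List Char) (e : Nat × Nat × Bool)
    (hb : e.1 + e.2.1 ≤ l1.length) (hs : e.2.2 = true → e.1 + e.2.1 = l1.length) :
    (sliceBy l1 l2 e).1.length = e.2.1 := by
  simp only [sliceBy]
  split
  · rename_i ht
    have := hs ht
    simp only [List.length_drop]
    omega
  · simp only [List.length_take, List.length_drop]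
    omega

theorem sliceBy_shift (l1 l2 : List Char) (k : Nat) (m : Nat × Nat × Bool) :
    sliceBy l1 l2 (m.1 + k, m.2.1, m.2.2) = sliceBy (l1.drop k) (l2.drop k) m := by
  simp only [sliceBy, List.drop_drop]
  rw [show m.1 + k = k + m.1 from by omega]

-- B's pieces are exactly the slices of the candidate runs
theorem piecesB_eq (l1 l2 : List Char) : ∀ (r : List Char) (i seg : Nat),
    piecesB l1 l2 r i seg =
      (segsOf r l2 i seg).map (fun e => ((l1.drop e.1).take e.2, (l2.drop e.1).take e.2)) ++
        [(l1.drop (lastSeg r l2 i seg), l2.drop (lastSeg r l2 i seg))] := by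
  intro r
  induction r with
  | nil => intro i seg; simp [piecesB, segsOf, lastSeg]
  | cons c r ih =>
    intro i seg
    simp only [piecesB, segsOf, lastSeg, mismTest_eq]
    split
    · rw [ih]; simp
    · exact ih _ _

theorem piecesB_entries (l1 l2 : List Char) :
    piecesB l1 l2 l1 0 0 = (entriesOf l1 l2).map (sliceBy l1 l2) := by
  rw [piecesB_eq]
  simp [entriesOf, sliceBy, Function.comp_def]

-- picking the longest piece = folding updB over the entries
theorem pickB_fold (l1 l2 : List Char) : ∀ (es : List (Nat × Nat × Bool))
    (cur m : Nat × Nat × Bool),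
    (cur.1 + cur.2.1 ≤ l1.length ∧ (cur.2.2 = true → cur.1 + cur.2.1 = l1.length)) →
    (∀ e ∈ es, e.1 + e.2.1 ≤ l1.length ∧ (e.2.2 = true → e.1 + e.2.1 = l1.length)) →
    foldU (some cur) es = some m →
    pickB (sliceBy l1 l2 cur) (es.map (sliceBy l1 l2)) = sliceBy l1 l2 m := by
  intro es
  induction es with
  | nil =>
    intro cur m _ _ h
    have : m = cur := by simpa [foldU] using h.symm
    subst this
    simp [pickB]
  | cons e es ih =>
    intro cur m hcur hall h
    have hcons : foldU (some cur) (e :: es) = foldU (updB (some cur) e.1 e.2.1 e.2.2) es := by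
      simp [foldU]
    rw [hcons] at h
    have he := hall e (by simp)
    have hlc := sliceBy_len l1 l2 cur hcur.1 hcur.2
    have hle := sliceBy_len l1 l2 e he.1 he.2
    simp only [List.map_cons, pickB, hlc, hle]
    have heta : (e.1, e.2.1, e.2.2) = e := rfl
    obtain ⟨cs, cl, cf⟩ := cur
    simp only [updB] at h
    split at h
    · rename_i hcond
      rw [if_pos hcond]
      rw [heta] at h
      exact ih e m he (fun x hx => hall x (by simp [hx])) h
    · rename_i hcond
      rw [if_neg hcond]
      exact ih (cs, cl, cf) m hcur (fun x hx => hall x (by simp [hx])) h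

theorem entriesOf_ok (l1 l2 : List Char) : ∀ e ∈ entriesOf l1 l2,
    e.1 + e.2.1 ≤ l1.length ∧ (e.2.2 = true → e.1 + e.2.1 = l1.length) := by
  intro e he
  simp only [entriesOf, List.mem_append, List.mem_map, List.mem_singleton] at he
  rcases he with ⟨p, hp, heq⟩ | he
  · have := segsOf_bounds l1 l2 0 0 (le_refl _) p hp
    rw [← heq]
    refine ⟨?_, ?_⟩
    · simp only
      omega
    · intro h; simp at h
  · have := lastSeg_bounds l1 l2 0 0 (le_refl _)
    rw [he]
    exact ⟨by simp; omega, by intro _; simp; omega⟩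

theorem alt_eq (s1 s2 : String) :
    dnaCompare_alt s1 s2 =
      [String.ofList (sliceBy s1.toList s2.toList (chosen s1.toList s2.toList)).1,
       String.ofList (sliceBy s1.toList s2.toList (chosen s1.toList s2.toList)).2] := by
  have hE := piecesB_entries s1.toList s2.toList
  have hch := chosen_some s1.toList s2.toList
  rcases hne : entriesOf s1.toList s2.toList with _ | ⟨e0, rest⟩
  · exfalso; simp [entriesOf] at hne
  · have hfold : foldU (some e0) rest = some (chosen s1.toList s2.toList) := by
      have : foldU none (e0 :: rest) = foldU (some (e0.1, e0.2.1, e0.2.2)) rest := by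
        simp [foldU, updB]
      rw [hne, this] at hch
      simpa using hch
    have hok := entriesOf_ok s1.toList s2.toList
    rw [hne] at hok
    have hpick := pickB_fold s1.toList s2.toList rest e0 (chosen s1.toList s2.toList)
      (hok e0 (by simp)) (fun x hx => hok x (by simp [hx])) hfold
    simp only [dnaCompare_alt, hE, hne, List.map_cons]
    rw [hpick]

theorem coreA_eq (l1 l2 : List Char) : coreA l1 l2 = sliceBy l1 l2 (chosen l1 l2) := by
  induction l1, l2 using coreA.induct with
  | case1 l1 l2 h =>
    rw [coreA, h, chosen_none l1 l2 h]
    simp [sliceBy]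
  | case2 l1 l2 f h _p1 _p2 hlt ih1 ih2 =>
    have hb := findMMAux_bounds l1 l2 0 f h
    have hleft : findMMAux (l1.take f) (l2.take f) 0 = none := by
      have := findMM_left_none l1 l2 (l2.take f) 0 f h (by
        intro j hj
        rw [List.getElem?_take_of_lt hj])
      simpa using this
    have hp1 : coreA (l1.take f) (l2.take f) = (l1.take f, l2.take f) := by
      rw [coreA, hleft]
    have hp1len : (l1.take f).length = f := by simp; omega
    have hsubb := chosen_bounds (l1.drop (f + 1)) (l2.drop (f + 1))
    have hp2len : (coreA (l1.drop (f + 1)) (l2.drop (f + 1))).1.length =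
        (chosen (l1.drop (f + 1)) (l2.drop (f + 1))).2.1 := by
      rw [ih2]
      exact sliceBy_len _ _ _ hsubb.1 hsubb.2
    have hltR : (coreA (l1.drop (f + 1)) (l2.drop (f + 1))).1.length <
        (coreA (l1.take f) (l2.take f)).1.length := hlt
    have hlt' : (chosen (l1.drop (f + 1)) (l2.drop (f + 1))).2.1 < f := by
      have h2 := hltR
      rw [hp1, hp2len] at h2
      simpa [hp1len] using h2
    rw [coreA, h]
    show (if (coreA (l1.drop (f + 1)) (l2.drop (f + 1))).1.length <
          (coreA (l1.take f) (l2.take f)).1.length then coreA (l1.take f) (l2.take f)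
        else coreA (l1.drop (f + 1)) (l2.drop (f + 1))) = sliceBy l1 l2 (chosen l1 l2)
    rw [if_pos hltR, hp1, chosen_split l1 l2 f h, if_neg (by omega)]
    simp [sliceBy]
  | case3 l1 l2 f h _p1 _p2 hnlt ih1 ih2 =>
    have hb := findMMAux_bounds l1 l2 0 f h
    have hleft : findMMAux (l1.take f) (l2.take f) 0 = none := by
      have := findMM_left_none l1 l2 (l2.take f) 0 f h (by
        intro j hj
        rw [List.getElem?_take_of_lt hj])
      simpa using this
    have hp1 : coreA (l1.take f) (l2.take f) = (l1.take f, l2.take f) := by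
      rw [coreA, hleft]
    have hp1len : (l1.take f).length = f := by simp; omega
    have hsubb := chosen_bounds (l1.drop (f + 1)) (l2.drop (f + 1))
    have hp2len : (coreA (l1.drop (f + 1)) (l2.drop (f + 1))).1.length =
        (chosen (l1.drop (f + 1)) (l2.drop (f + 1))).2.1 := by
      rw [ih2]
      exact sliceBy_len _ _ _ hsubb.1 hsubb.2
    have hnltR : ¬ (coreA (l1.drop (f + 1)) (l2.drop (f + 1))).1.length <
        (coreA (l1.take f) (l2.take f)).1.length := hnlt
    have hle : f ≤ (chosen (l1.drop (f + 1)) (l2.drop (f + 1))).2.1 := by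
      have h2 := hnltR
      rw [hp1, hp2len] at h2
      simp only [hp1len] at h2
      omega
    rw [coreA, h]
    show (if (coreA (l1.drop (f + 1)) (l2.drop (f + 1))).1.length <
          (coreA (l1.take f) (l2.take f)).1.length then coreA (l1.take f) (l2.take f)
        else coreA (l1.drop (f + 1)) (l2.drop (f + 1))) = sliceBy l1 l2 (chosen l1 l2)
    rw [if_neg hnltR, chosen_split l1 l2 f h, if_pos hle, sliceBy_shift]
    exact ih2

-- ===== VERDICT (by name: the statement is the Claim_ definition above) =====
theorem dnaCompare_spec : Claim_equal_dnaCompare := by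
  intro s1 s2 _ _
  unfold Spec_dnaCompare dnaCompare
  rw [alt_eq, coreA_eq]
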